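-- pv_equiv track=rewrite | github.com/rdadkins01/AOC-2025 | 02/p2.py | duplicate_check
-- ===== SOURCE A (Python) =====
-- import math
--
-- def get_values_to_check(value):
--     current_num = ""
--     values_to_check = []
--     for num in value:
--
--         # Dont need to check values longer than half the length of original value
--         if len(current_num) <= int(math.floor(len(value)/2)):
--
--             # Also don't need to add values that can't completely repeat due to length
--             if current_num != "":
--                 if len(value) % len(current_num) == 0:
--                     values_to_check.append(current_num)
--             current_num += num
--     return values_to_check
--
-- def duplicate_check(value):
--     values_to_check = get_values_to_check(value)
--     for questionable_id in values_to_check: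
--         mismatch = False
--
--         qty_to_check = int(len(value) / len(questionable_id))
--
--         for multiplier in range(1, qty_to_check + 1):
--             end_pos = (len(questionable_id) * multiplier)
--             start_pos = end_pos - len(questionable_id)
--             if questionable_id != value[start_pos:end_pos]:
--                 mismatch = True
--
--         if not mismatch:
--             return True
--     return False
-- ===== SOURCE B (Python) =====
-- def duplicate_check(value):
--     # doubling trick: value is a repetition of a proper prefix
--     # iff it occurs inside (value + value) with both ends chopped off
--     return bool(value) and value in (value + value)[1:-1]
-- ===== Notes on version B (the rewrite author's own statement) =====
-- stated objective: faster
-- what changed: Replaced the divisor-enumerating block-comparison loops with the string-doubling trick: value is periodic iff it occurs inside (value+value)[1:-1], a single substring search.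
import Mathlib
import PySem

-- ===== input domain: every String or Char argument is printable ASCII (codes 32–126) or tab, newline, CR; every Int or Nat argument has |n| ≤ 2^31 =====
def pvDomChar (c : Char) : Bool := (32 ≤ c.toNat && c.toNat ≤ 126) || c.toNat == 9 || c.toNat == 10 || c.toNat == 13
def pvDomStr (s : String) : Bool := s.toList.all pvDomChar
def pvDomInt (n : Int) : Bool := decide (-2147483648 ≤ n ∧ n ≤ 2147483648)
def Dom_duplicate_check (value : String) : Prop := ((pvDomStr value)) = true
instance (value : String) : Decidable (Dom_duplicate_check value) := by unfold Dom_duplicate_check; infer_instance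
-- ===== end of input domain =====

-- B replaces A's divisor-enumerating block-comparison loops by the string-doubling trick
-- (value occurs inside (value+value)[1:-1]): one substring search instead of nested loops.
-- Both ports work on the code-point list value.toList (string ops ported via PySem.Chars/PySem.List, exact).

-- ===== PORT A =====
-- get_values_to_check: fold over the characters carrying (current_num, values_to_check).
-- int(math.floor(len(value)/2)) is exactly len(value) // 2 for a nonnegative length.
def pvGetValsStep (n : Int) (st : List Char × List (List Char)) (num : Char) :
    List Char × List (List Char) :=
  if (st.1.length : Int) ≤ PySem.Int.floordiv n 2 then
    (st.1 ++ [num],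
     if st.1 ≠ [] then
       (if PySem.Int.mod n (st.1.length : Int) = 0 then st.2 ++ [st.1] else st.2)
     else st.2)
  else st

def pvGetVals (s : List Char) : List (List Char) :=
  (s.foldl (pvGetValsStep (s.length : Int)) ([], [])).2

-- inner loop of duplicate_check: the mismatch flag over range(1, qty_to_check + 1);
-- int(len(value)/len(questionable_id)) is float division then int(): truncating division.
def pvCheckOne (s qid : List Char) : Bool :=
  let qty : Int := PySem.Int.truncdiv (s.length : Int) (qid.length : Int)
  let mismatch := (PySem.List.pyRange 1 (qty + 1) 1).foldl
    (fun m mult =>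
      let end_pos := (qid.length : Int) * mult
      let start_pos := end_pos - (qid.length : Int)
      if qid ≠ PySem.List.slice s (some start_pos) (some end_pos) then true else m) false
  !mismatch

-- outer loop: early `return True` at the first candidate without mismatch
def pvALoop (s : List Char) : List (List Char) → Bool
  | [] => false
  | q :: rest => if pvCheckOne s q then true else pvALoop s rest

def duplicate_check (value : String) : Bool :=
  pvALoop value.toList (pvGetVals value.toList)

-- ===== PORT B =====
-- Source B: return bool(value) and value in (value + value)[1:-1]
def duplicate_check_alt (value : String) : Bool :=
  if value.toList.isEmpty then false
  else PySem.Chars.isIn value.toList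
    (PySem.List.slice (value.toList ++ value.toList) (some 1) (some (-1)))

-- ===== PRECONDITION & SPEC =====
def Spec_duplicate_check (value : String) (out : Bool) : Prop := out = duplicate_check_alt value
instance (value : String) (out : Bool) : Decidable (Spec_duplicate_check value out) := by
  unfold Spec_duplicate_check; infer_instance

-- ===== CLAIM (what is proved, stated in full; the proofs are below) =====
def Claim_equal_duplicate_check : Prop :=
  ∀ (value : String), Dom_duplicate_check value → Spec_duplicate_check value (duplicate_check value)

-- ===== LEMMAS AND PROOFS =====

-- the mismatch-flag fold is an `any`
theorem pv_foldl_iftrue' {α : Type} (P : α → Prop) [DecidablePred P] (l : List α) (b : Bool) :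
    l.foldl (fun m x => if P x then true else m) b = (b || l.any (fun x => decide (P x))) := by
  induction l generalizing b with
  | nil => simp
  | cons x xs ih =>
    simp only [List.foldl_cons, List.any_cons, ih]
    by_cases h : P x <;> simp [h]

-- "cs is L-periodic": every position reads as its residue mod L
def pvPer (cs : List Char) (L : Nat) : Prop :=
  ∀ j < cs.length, cs.getD j ' ' = cs.getD (j % L) ' '

theorem pv_rot_iff (cs : List Char) (k : Nat) :
    cs.rotate k = cs ↔
      ∀ j < cs.length, cs.getD ((j + k) % cs.length) ' ' = cs.getD j ' ' := by
  constructor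
  · intro h j hj
    have hn : 0 < cs.length := by omega
    have hlt : (j + k) % cs.length < cs.length := Nat.mod_lt _ (by omega)
    have h1 : j < (cs.rotate k).length := by simpa using hj
    have h2 := List.getElem_rotate cs k j h1
    have h3 : (cs.rotate k)[j]'h1 = cs[j]'hj := by simp only [h]
    rw [List.getD_eq_getElem cs ' ' hlt, List.getD_eq_getElem cs ' ' hj, ← h2, h3]
  · intro h
    apply List.ext_getElem (by simp)
    intro i h1 h2
    rw [List.getElem_rotate]
    have hlt : (i + k) % cs.length < cs.length := Nat.mod_lt _ (by omega)
    have := h i h2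
    rwa [List.getD_eq_getElem cs ' ' hlt, List.getD_eq_getElem cs ' ' h2] at this

theorem pv_rot_of_per (cs : List Char) (L : Nat) (hdvd : L ∣ cs.length)
    (h : pvPer cs L) : cs.rotate L = cs := by
  rw [pv_rot_iff cs L]
  intro j hj
  have hn : 0 < cs.length := by omega
  have h1 : (j + L) % cs.length < cs.length := Nat.mod_lt _ hn
  rw [h _ h1, h _ hj, Nat.mod_mod_of_dvd _ hdvd, Nat.add_mod_right]

-- iterated shift

theorem pv_shift_iter (cs : List Char) (k : Nat)
    (h : ∀ j < cs.length, cs.getD ((j + k) % cs.length) ' ' = cs.getD j ' ')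
    (t : Nat) : ∀ j < cs.length, cs.getD ((j + t * k) % cs.length) ' ' = cs.getD j ' ' := by
  induction t with
  | zero => intro j hj; simp [Nat.mod_eq_of_lt hj]
  | succ t ih =>
    intro j hj
    have hn : 0 < cs.length := by omega
    have h1 : (j + t * k) % cs.length < cs.length := Nat.mod_lt _ hn
    have := h _ h1
    rw [ih j hj] at this
    rw [← this]
    congr 1
    have : j + (t + 1) * k = (j + t * k) + k := by ring
    rw [this, Nat.add_mod (j + t * k) k, Nat.add_mod ((j + t * k) % cs.length) k,
      Nat.mod_mod_of_dvd _ (dvd_refl _)]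

-- Bezout: some multiple of k is ≡ gcd k n (mod n)

theorem pv_bezout (k n : Nat) (hn : 0 < n) :
    ∃ t : Nat, (t * k) % n = Nat.gcd k n % n := by
  have hB := Nat.gcd_eq_gcd_ab k n
  set a := Nat.gcdA k n
  set b := Nat.gcdB k n
  refine ⟨(a % (n : Int)).toNat, ?_⟩
  have hn' : (0 : Int) < n := by exact_mod_cast hn
  have ha : 0 ≤ a % (n : Int) := Int.emod_nonneg _ (by omega)
  have key : (((a % (n : Int)).toNat * k : Nat) : Int) % n = ((Nat.gcd k n : Int)) % n := by
    push_cast [Int.toNat_of_nonneg ha]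
    calc (a % (n:Int)) * k % n = a * k % n := by
          rw [Int.mul_emod, Int.emod_emod_of_dvd _ (dvd_refl _), ← Int.mul_emod]
     _ = (k * a + n * b) % n := by rw [Int.add_mul_emod_self_left, mul_comm]
     _ = (Nat.gcd k n : Int) % n := by rw [← hB]
  exact_mod_cast key

theorem pv_per_of_rot (cs : List Char) (k : Nat) (hk0 : 0 < k) (hkn : k < cs.length)
    (h : cs.rotate k = cs) : pvPer cs (Nat.gcd k cs.length) := by
  have hn0 : 0 < cs.length := by omega
  have hg0 : 0 < Nat.gcd k cs.length := Nat.gcd_pos_of_pos_left _ hk0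
  have hshift := (pv_rot_iff cs k).1 h
  obtain ⟨t, ht⟩ := pv_bezout k cs.length hn0
  have hgshift : ∀ j < cs.length,
      cs.getD ((j + Nat.gcd k cs.length) % cs.length) ' ' = cs.getD j ' ' := by
    intro j hj
    have hit := pv_shift_iter cs k hshift t j hj
    rw [← hit]
    congr 1
    rw [Nat.add_mod j (t * k), ht, ← Nat.add_mod]
  intro j hj
  induction j using Nat.strong_induction_on with
  | _ j ih =>
    rcases Nat.lt_or_ge j (Nat.gcd k cs.length) with hjg | hjg
    · rw [Nat.mod_eq_of_lt hjg]
    · have hj' : j - Nat.gcd k cs.length < cs.length := by omega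
      have hs := hgshift (j - Nat.gcd k cs.length) hj'
      rw [Nat.sub_add_cancel hjg, Nat.mod_eq_of_lt hj] at hs
      rw [hs, ih (j - Nat.gcd k cs.length) (by omega) hj']
      congr 1
      conv_rhs => rw [← Nat.sub_add_cancel hjg]
      rw [Nat.add_mod_right]

theorem pv_slice_one_negone (xs : List Char) (h : 1 ≤ xs.length) :
    PySem.List.slice xs (some 1) (some (-1)) = (xs.drop 1).take (xs.length - 2) := by
  have hne : xs ≠ [] := by intro h0; simp [h0] at h
  simp only [PySem.List.slice, PySem.List.clampIdx]
  have e1 : min (1 : Int).toNat xs.length = 1 := by simp; omega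
  have e2 : (if xs = [] then 0 else ((xs.length : Int) + -1).toNat) = xs.length - 1 := by
    simp [hne]; omega
  norm_num [e2]
  congr 1
  · omega
  · have : min 1 xs.length = 1 := by omega
    rw [this, List.drop_one]

theorem pv_key (cs : List Char) (k : Nat) (hk1 : 1 ≤ k) (hk2 : k ≤ cs.length - 1)
    (hn : 1 ≤ cs.length) :
    (cs <+: (((cs ++ cs).drop 1).take (2 * cs.length - 2)).drop (k - 1)) ↔
      cs.rotate k = cs := by
  have hkn : k ≤ cs.length := by omega
  have e1 : 1 + (k - 1) = k := by omega
  have e2 : 2 * cs.length - 2 - (k - 1) = 2 * cs.length - 1 - k := by omega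
  have h1 : (((cs ++ cs).drop 1).take (2 * cs.length - 2)).drop (k - 1)
      = ((cs ++ cs).drop k).take (2 * cs.length - 1 - k) := by
    rw [List.drop_take, List.drop_drop, e1, e2]
  have h2 : (cs ++ cs).drop k = cs.drop k ++ cs := by
    rw [List.drop_append_of_le_length hkn]
  rw [h1, h2, List.prefix_iff_eq_take, List.take_take]
  have h3 : min cs.length (2 * cs.length - 1 - k) = cs.length := by omega
  rw [h3, List.take_append]
  have h4 : cs.length - (cs.drop k).length = k := by simp; omega
  rw [List.take_of_length_le (by simp), h4]
  rw [List.rotate_eq_drop_append_take hkn]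
  exact ⟨fun h => h.symm, fun h => h.symm⟩

theorem pv_B_chars (cs : List Char) :
    (if cs.isEmpty then false
     else PySem.Chars.isIn cs (PySem.List.slice (cs ++ cs) (some 1) (some (-1)))) = true ↔
    ∃ k, 0 < k ∧ k < cs.length ∧ cs.rotate k = cs := by
  by_cases hc : cs.isEmpty
  · have : cs = [] := by simpa [List.isEmpty_iff] using hc
    subst this
    simp
  · have hn : 1 ≤ cs.length := by
      cases cs
      · simp at hc
      · simp
    rw [if_neg hc, pv_slice_one_negone (cs ++ cs) (by simp; omega)]
    have hlen2 : (cs ++ cs).length - 2 = 2 * cs.length - 2 := by simp; omega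
    rw [hlen2, ← PySem.Chars.exists_prefix_drop_iff_isIn]
    constructor
    · rintro ⟨j, hpre⟩
      have hlen := hpre.length_le
      have hmid : ((((cs ++ cs).drop 1).take (2 * cs.length - 2)).drop j).length
          = 2 * cs.length - 2 - j := by simp; omega
      rw [hmid] at hlen
      have hj : j ≤ cs.length - 2 := by omega
      refine ⟨j + 1, by omega, by omega, ?_⟩
      have := (pv_key cs (j + 1) (by omega) (by omega) hn).1
      simp only [Nat.add_sub_cancel] at this
      exact this hpre
    · rintro ⟨k, hk0, hkn, hrot⟩
      exact ⟨k - 1, (pv_key cs k (by omega) (by omega) hn).2 hrot⟩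

theorem pv_B_iff (value : String) :
    duplicate_check_alt value = true ↔
      ∃ k, 0 < k ∧ k < value.toList.length ∧ value.toList.rotate k = value.toList :=
  pv_B_chars value.toList

theorem pv_aloop_any (s : List Char) (l : List (List Char)) :
    pvALoop s l = l.any (pvCheckOne s) := by
  induction l with
  | nil => rfl
  | cons q rest ih =>
    simp only [pvALoop, List.any_cons, ih]
    by_cases h : pvCheckOne s q = true <;> simp [h]

-- one fold step, cast bookkeeping done once

theorem pv_step_eq (s : List Char) (st : List Char × List (List Char)) (num : Char) :
    pvGetValsStep (s.length : Int) st num =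
      if st.1.length ≤ s.length / 2 then
        (st.1 ++ [num],
         if st.1 ≠ [] then
           (if s.length % st.1.length = 0 then st.2 ++ [st.1] else st.2)
         else st.2)
      else st := by
  have hfd : PySem.Int.floordiv (s.length : Int) 2 = ((s.length / 2 : Nat) : Int) := by
    exact_mod_cast PySem.Int.floordiv_natCast s.length 2
  have hmod : PySem.Int.mod (s.length : Int) (st.1.length : Int)
      = ((s.length % st.1.length : Nat) : Int) := PySem.Int.mod_natCast _ _
  rw [pvGetValsStep, hfd, hmod]
  simp only [Int.natCast_eq_zero, Nat.cast_le]

theorem pv_getVals_aux (s : List Char) (t : Nat) (ht : t ≤ s.length) :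
    (s.take t).foldl (pvGetValsStep (s.length : Int)) ([], []) =
      (s.take (min t (s.length / 2 + 1)),
       ((List.range' 1 (min (t - 1) (s.length / 2))).filter
         (fun L => s.length % L = 0)).map (fun L => s.take L)) := by
  induction t with
  | zero => simp
  | succ t ih =>
    have ht' : t ≤ s.length := by omega
    have htlt : t < s.length := by omega
    rw [List.take_add_one, List.getElem?_eq_getElem htlt, Option.toList_some,
      List.foldl_append, ih ht', List.foldl_cons, List.foldl_nil, pv_step_eq]
    by_cases hg : t ≤ s.length / 2
    · -- current = s.take t, guard holds
      have hm : min t (s.length / 2 + 1) = t := by omega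
      rw [hm]
      have hlen : (s.take t).length = t := by simp; omega
      rw [if_pos (by rw [hlen]; exact hg)]
      have hcur : s.take t ++ [s[t]] = s.take (t + 1) := by
        rw [List.take_add_one, List.getElem?_eq_getElem htlt, Option.toList_some]
      have hm2 : min (t + 1) (s.length / 2 + 1) = t + 1 := by omega
      rw [hcur, hm2]
      rcases Nat.eq_zero_or_pos t with rfl | ht0
      · simp
      · have hne : s.take t ≠ [] := by
          intro h0
          rw [h0] at hlen
          simp at hlen
          omega
        rw [if_pos hne, hlen]
        have hr : min (t + 1 - 1) (s.length / 2) = t := by omega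
        have hr' : min (t - 1) (s.length / 2) = t - 1 := by omega
        rw [hr, hr']
        have hrange : List.range' 1 t = List.range' 1 (t - 1) ++ [t] := by
          have e : t = (t - 1) + 1 := by omega
          conv_lhs => rw [e]
          rw [List.range'_concat]
          have e2 : 1 + 1 * (t - 1) = t := by omega
          rw [e2]
        rw [hrange, List.filter_append, List.map_append]
        by_cases hd : s.length % t = 0 <;> simp [hd]
    · -- guard fails: state unchanged
      have hlen : (s.take (min t (s.length / 2 + 1))).length = s.length / 2 + 1 := by
        rw [List.length_take]; omega
      rw [if_neg (by rw [hlen]; omega)]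
      have e1 : min t (s.length / 2 + 1) = min (t + 1) (s.length / 2 + 1) := by omega
      have e2 : min (t - 1) (s.length / 2) = min (t + 1 - 1) (s.length / 2) := by omega
      rw [e1, e2]

theorem pv_getVals_eq (cs : List Char) :
    pvGetVals cs =
      ((List.range' 1 (cs.length / 2)).filter (fun L => cs.length % L = 0)).map
        (fun L => cs.take L) := by
  have h := pv_getVals_aux cs cs.length (le_refl _)
  rw [List.take_length] at h
  rw [pvGetVals, h]
  have : min (cs.length - 1) (cs.length / 2) = cs.length / 2 := by omega
  rw [this]

theorem pv_getElem?_some (cs : List Char) (j : Nat) (hj : j < cs.length) :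
    cs[j]? = some (cs.getD j ' ') := by
  rw [List.getElem?_eq_getElem hj, List.getD_eq_getElem cs ' ' hj]

theorem pv_blocks_iff (cs : List Char) (L : Nat) (hL : 0 < L) (hdvd : L ∣ cs.length) :
    (∀ m : Nat, 1 ≤ m → m ≤ cs.length / L → cs.take L = (cs.drop (L * (m - 1))).take L) ↔
      pvPer cs L := by
  constructor
  · intro hB j hj
    have hr : j % L < L := Nat.mod_lt _ hL
    have hq : j / L < cs.length / L := Nat.div_lt_div_of_lt_of_dvd hdvd hj
    have hjeq : L * (j / L) + j % L = j := Nat.div_add_mod j L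
    have hblock := hB (j / L + 1) (Nat.le_add_left 1 _) (by omega)
    simp only [Nat.add_sub_cancel] at hblock
    have hview := congrArg (fun l => l[j % L]?) hblock
    simp only [List.getElem?_take_of_lt hr, List.getElem?_drop] at hview
    rw [pv_getElem?_some cs (j % L) (lt_of_le_of_lt (Nat.mod_le j L) hj),
      pv_getElem?_some cs (L * (j / L) + j % L) (by rw [hjeq]; exact hj)] at hview
    rw [hjeq] at hview
    exact (Option.some_inj.1 hview).symm
  · intro hP m hm1 hm2
    have hLm : L * m ≤ cs.length := by
      rw [Nat.mul_comm]
      exact (Nat.le_div_iff_mul_le hL).1 hm2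
    apply List.ext_getElem?
    intro i
    by_cases hi : i < L
    · have hstep : L * (m - 1) + L ≤ L * m := by
        have e : L * (m - 1) + L = L * (m - 1 + 1) := by ring
        rw [e]
        exact Nat.mul_le_mul_left _ (by omega)
      have h1 : i < cs.length := by omega
      have h2 : L * (m - 1) + i < cs.length := by omega
      rw [List.getElem?_take_of_lt hi, List.getElem?_take_of_lt hi,
        List.getElem?_drop, pv_getElem?_some cs i h1, pv_getElem?_some cs _ h2]
      congr 1
      rw [hP i h1, hP (L * (m - 1) + i) h2, Nat.mul_add_mod]
    · have e1 : (cs.take L)[i]? = none := by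
        rw [List.getElem?_eq_none]
        rw [List.length_take]
        omega
      have e2 : ((cs.drop (L * (m - 1))).take L)[i]? = none := by
        rw [List.getElem?_eq_none]
        rw [List.length_take]
        omega
      rw [e1, e2]

theorem pv_checkOne_iff (cs : List Char) (L : Nat) (hL : 0 < L) (hdvd : L ∣ cs.length)
    (hLn : L ≤ cs.length) :
    pvCheckOne cs (cs.take L) = true ↔ pvPer cs L := by
  have hql : (cs.take L).length = L := by rw [List.length_take]; omega
  have hqty : PySem.Int.truncdiv (cs.length : Int) (L : Int) = ((cs.length / L : Nat) : Int) := by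
    simp [PySem.Int.truncdiv]
  rw [pvCheckOne]
  simp only [hql, hqty, pv_foldl_iftrue', Bool.false_or, Bool.not_eq_eq_eq_not, Bool.not_true,
    List.any_eq_false, decide_eq_true_eq, not_not]
  rw [← pv_blocks_iff cs L hL hdvd]
  constructor
  · intro h m hm1 hm2
    have hmem : ((m : Int)) ∈ PySem.List.pyRange 1 (((cs.length / L : Nat) : Int) + 1) 1 := by
      rw [PySem.List.mem_pyRange_one]
      constructor
      · exact_mod_cast hm1
      · have : (m : Int) ≤ ((cs.length / L : Nat) : Int) := by exact_mod_cast hm2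
        omega
    have := h (m : Int) hmem
    rw [this]
    have e1 : (L : Int) * (m : Int) - (L : Int) = ((L * (m - 1) : Nat) : Int) := by
      push_cast [Nat.cast_sub hm1]
      ring
    have e2 : (L : Int) * (m : Int) = ((L * m : Nat) : Int) := by push_cast; ring
    rw [e1, e2, PySem.List.slice_toNat cs (by positivity) (by positivity),
      Int.toNat_natCast, Int.toNat_natCast]
    have e3 : L * m - L * (m - 1) = L := by
      obtain ⟨m', rfl⟩ : ∃ m', m = m' + 1 := ⟨m - 1, by omega⟩
      rw [Nat.add_sub_cancel, Nat.mul_succ]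
      omega
    rw [e3]
  · intro h mult hmem
    rw [PySem.List.mem_pyRange_one] at hmem
    obtain ⟨hm1, hm2⟩ := hmem
    have hm0 : 0 ≤ mult := by omega
    obtain ⟨m, rfl⟩ : ∃ m : Nat, mult = (m : Int) := ⟨mult.toNat, (Int.toNat_of_nonneg hm0).symm⟩
    have hm1' : 1 ≤ m := by exact_mod_cast hm1
    have hm2' : m ≤ cs.length / L := by
      have h2 : (m : Int) ≤ ((cs.length / L : Nat) : Int) := by omega
      exact_mod_cast h2
    have hb := h m hm1' hm2'
    have e1 : (L : Int) * (m : Int) - (L : Int) = ((L * (m - 1) : Nat) : Int) := by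
      push_cast [Nat.cast_sub hm1']
      ring
    have e2 : (L : Int) * (m : Int) = ((L * m : Nat) : Int) := by push_cast; ring
    rw [e1, e2, PySem.List.slice_toNat cs (by positivity) (by positivity),
      Int.toNat_natCast, Int.toNat_natCast]
    have e3 : L * m - L * (m - 1) = L := by
      obtain ⟨m', rfl⟩ : ∃ m', m = m' + 1 := ⟨m - 1, by omega⟩
      rw [Nat.add_sub_cancel, Nat.mul_succ]
      omega
    rw [e3]
    exact hb

theorem pv_A_iff (cs : List Char) :
    pvALoop cs (pvGetVals cs) = true ↔
      ∃ L, 0 < L ∧ L ≤ cs.length / 2 ∧ cs.length % L = 0 ∧ pvPer cs L := by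
  rw [pv_aloop_any, pv_getVals_eq, List.any_map, List.any_eq_true]
  constructor
  · rintro ⟨L, hmem, hchk⟩
    rw [List.mem_filter, List.mem_range'_1] at hmem
    obtain ⟨⟨h1, h2⟩, hmod⟩ := hmem
    rw [decide_eq_true_eq] at hmod
    have hdvd : L ∣ cs.length := Nat.dvd_of_mod_eq_zero hmod
    have hhalf : cs.length / 2 ≤ cs.length := Nat.div_le_self _ _
    exact ⟨L, by omega, by omega, hmod,
      (pv_checkOne_iff cs L (by omega) hdvd (by omega)).1 hchk⟩
  · rintro ⟨L, hL0, hLh, hmod, hper⟩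
    have hdvd : L ∣ cs.length := Nat.dvd_of_mod_eq_zero hmod
    have hhalf : cs.length / 2 ≤ cs.length := Nat.div_le_self _ _
    refine ⟨L, ?_, ?_⟩
    · rw [List.mem_filter, List.mem_range'_1]
      exact ⟨⟨by omega, by omega⟩, by rw [decide_eq_true_eq]; exact hmod⟩
    · exact (pv_checkOne_iff cs L hL0 hdvd (by omega)).2 hper

-- a positive proper divisor is at most half
theorem pv_dvd_le_half (g n : Nat) (hg : 0 < g) (hdvd : g ∣ n) (hlt : g < n) : g ≤ n / 2 := by
  obtain ⟨m, rfl⟩ := hdvd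
  rcases Nat.lt_or_ge m 2 with hm | hm
  · interval_cases m <;> omega
  · calc g ≤ g * m / 2 := Nat.le_div_iff_mul_le (by omega) |>.2 (by nlinarith)
    _ = _ := rfl

-- ===== VERDICT (by name: the statement is the Claim_ definition above) =====
theorem duplicate_check_spec : Claim_equal_duplicate_check := by
  intro value _
  unfold Spec_duplicate_check
  rw [show duplicate_check value = pvALoop value.toList (pvGetVals value.toList) from rfl]
  rw [Bool.eq_iff_iff, pv_A_iff value.toList, pv_B_iff value]
  set cs := value.toList with hcs
  constructor
  · rintro ⟨L, hL0, hLh, hmod, hper⟩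
    have hn : 2 ≤ cs.length := by
      have := Nat.le_div_iff_mul_le (k := 2) (by omega) |>.1 hLh; omega
    exact ⟨L, hL0, by omega,
      pv_rot_of_per cs L (Nat.dvd_iff_mod_eq_zero.2 hmod) hper⟩
  · rintro ⟨k, hk0, hkn, hrot⟩
    have hg0 : 0 < Nat.gcd k cs.length := Nat.gcd_pos_of_pos_left _ hk0
    have hgd : Nat.gcd k cs.length ∣ cs.length := Nat.gcd_dvd_right _ _
    have hglt : Nat.gcd k cs.length < cs.length :=
      lt_of_le_of_lt (Nat.le_of_dvd hk0 (Nat.gcd_dvd_left _ _)) hkn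
    exact ⟨Nat.gcd k cs.length, hg0, pv_dvd_le_half _ _ hg0 hgd hglt,
      Nat.dvd_iff_mod_eq_zero.1 hgd, pv_per_of_rot cs k hk0 hkn hrot⟩
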